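-- pv_equiv track=rewrite | github.com/ololade-g/BIO539-python | script_smallest_k.py | find_substrings
-- ===== SOURCE A (Python) =====
-- def find_substrings(sequence, k):
--     """
--     Finds all substrings of length k in the given sequence that contain only A, C, G, and T,
--     and identifies the immediate subsequent substring for each.
--
--     Args:
--         sequence (str): The input sequence.
--         k (int): The desired length of substrings.
--
--     Returns:
--         tuple: A tuple containing:
--             - list: All substrings of size k that contain only A, C, G, and T.
--             - dict: A dictionary where keys are substrings and values are sets of unique subsequent substrings.
--     """
--     # Define the valid characters
--     valid_chars = {'A', 'C', 'G', 'T'}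
--
--     # Initialize the list of all valid substrings and the dictionary for subsequent substrings
--     all_substrings = []
--     subsequent_substrings = {}
--
--     # Initialize the index
--     i = 0
--     # Loop through the sequence until there are no more substrings of length k
--     while i <= len(sequence) - k:
--         # Extract the substring of length k
--         substring = sequence[i:i+k]
--         # Check if the substring contains only valid characters
--         if set(substring).issubset(valid_chars):
--             # If valid, add the substring to the list of all substrings
--             all_substrings.append(substring)
--             # Check if there is a subsequent substring to consider
--             if i < len(sequence) - k:
--                 # Extract the subsequent substring
--                 next_substring = sequence[i+1:i+k+1]
--                 # Check if the subsequent substring is also valid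
--                 if set(next_substring).issubset(valid_chars):
--                     # If valid, add it to the set of subsequent substrings
--                     if substring not in subsequent_substrings:
--                         subsequent_substrings[substring] = set()
--                     subsequent_substrings[substring].add(next_substring)
--             # Move to the next character in the sequence
--             i += 1
--         else:
--             # If an invalid character is found, skip it
--             i += 1
--             # Continue skipping any subsequent invalid characters
--             while i < len(sequence) and sequence[i] not in valid_chars:
--                 i += 1
--
--     # Return the list of all valid substrings and the dictionary of subsequent substrings
--     return all_substrings, subsequent_substrings
-- ===== SOURCE B (Python) =====
-- def find_substrings(sequence, k):
--     # Two-pass re-implementation: first collect all valid windows (with a set of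
--     # valid start indices), then link each kept window to its successor via the
--     # index set, instead of A's single stateful skip-scan.
--     valid_chars = {'A', 'C', 'G', 'T'}
--     n = len(sequence)
--     kept = []
--     valid_starts = set()
--     for i in range(n - k + 1):
--         sub = sequence[i:i+k]
--         if set(sub) <= valid_chars:
--             kept.append((i, sub))
--             valid_starts.add(i)
--     all_substrings = [sub for _, sub in kept]
--     subsequent = {}
--     for i, sub in kept:
--         if i < n - k and (i + 1) in valid_starts:
--             subsequent.setdefault(sub, set()).add(sequence[i+1:i+k+1])
--     return all_substrings, subsequent
-- ===== Notes on version B (the rewrite author's own statement) =====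
-- stated objective: alternative
-- what changed: Replaces A's single stateful skip-scan (which interleaves list building, dict building and an adaptive skip over invalid characters) with two independent passes: pass one scans every start index once, collecting the valid windows and a set of valid start indices; pass two links each kept window to its successor by membership in that index set.
-- outside the precondition, e.g. on find_substrings('xx', -1): A returns (['', ''], {'': {''}}), B returns (['', '', ''], {'': {''}})
import Mathlib
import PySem

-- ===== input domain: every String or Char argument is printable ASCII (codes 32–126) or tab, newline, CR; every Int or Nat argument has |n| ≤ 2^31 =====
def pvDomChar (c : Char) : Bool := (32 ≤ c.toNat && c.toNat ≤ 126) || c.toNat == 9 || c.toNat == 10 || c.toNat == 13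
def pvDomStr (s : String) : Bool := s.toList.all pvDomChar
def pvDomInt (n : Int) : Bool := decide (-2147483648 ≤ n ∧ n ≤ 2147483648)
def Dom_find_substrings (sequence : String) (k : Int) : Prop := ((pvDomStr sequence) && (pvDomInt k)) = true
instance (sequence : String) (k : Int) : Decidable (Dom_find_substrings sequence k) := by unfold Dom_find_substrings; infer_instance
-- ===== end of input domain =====

-- B replaces A's stateful skip-scan by two independent passes (collect valid windows + valid-start
-- index set, then link successors through that set); same cost, different decomposition ("alternative").

-- ===== PORT A =====
-- the Python set literal {'A','C','G','T'}
def pvValidChars : PySem.Set Char := PySem.Set.ofList ['A', 'C', 'G', 'T']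

-- inner 'while i < len(sequence) and sequence[i] not in valid_chars: i += 1'
-- (gas is fuel making the recursion structural; cs.length always suffices)
def pvSkip (cs : List Char) : Nat → Nat → Nat
  | 0, i => i
  | gas+1, i =>
    if h : i < cs.length then
      if PySem.Set.contains pvValidChars cs[i] then i
      else pvSkip cs gas (i+1)
    else i

-- outer 'while i <= len(sequence) - k' loop, step for step
-- (gas is fuel making the recursion structural; the caller supplies enough for every iteration)
def pvLoopA (cs : List Char) (k : Int) :
    Nat → Nat → List String → PySem.Dict String (PySem.Set String) →
    List String × List (String × List String)
  | 0, _, acc, d => (acc, d.items)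
  | gas+1, i, acc, d =>
    if (i : Int) ≤ (cs.length : Int) - k then
      let sub := PySem.List.slice cs (some (i : Int)) (some ((i : Int) + k))
      if PySem.Set.issubset (PySem.Set.ofList sub) pvValidChars then
        let acc' := acc ++ [String.ofList sub]
        let d' :=
          if (i : Int) < (cs.length : Int) - k then
            let nxt := PySem.List.slice cs (some ((i : Int) + 1)) (some ((i : Int) + k + 1))
            if PySem.Set.issubset (PySem.Set.ofList nxt) pvValidChars then
              let key := String.ofList sub
              let d1 := if d.contains key then d else d.insert key PySem.Set.empty
              d1.insert key (PySem.Set.add (d1.getD key PySem.Set.empty) (String.ofList nxt))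
            else d
          else d
        pvLoopA cs k gas (i+1) acc' d'
      else
        pvLoopA cs k gas (pvSkip cs cs.length (i+1)) acc d
    else (acc, d.items)

def find_substrings (sequence : String) (k : Int) : List String × (List (String × List String)) :=
  let cs := sequence.toList
  pvLoopA cs k (((cs.length : Int) - k + 1).toNat + 1) 0 [] PySem.Dict.empty

-- ===== PORT B =====
def find_substrings_alt (sequence : String) (k : Int) : List String × (List (String × List String)) :=
  let cs := sequence.toList
  let n : Int := (cs.length : Int)
  -- pass one: collect (i, window) for every valid window, and the set of valid start indices
  let ks := (PySem.List.pyRange 0 (n - k + 1) 1).foldl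
    (fun (st : List (Int × List Char) × PySem.Set Int) i =>
      let sub := PySem.List.slice cs (some i) (some (i + k))
      if PySem.Set.issubset (PySem.Set.ofList sub) pvValidChars then
        (st.1 ++ [(i, sub)], PySem.Set.add st.2 i)
      else st)
    ([], PySem.Set.empty)
  let kept := ks.1
  let validStarts := ks.2
  let allSubstrings := kept.map (fun p => String.ofList p.2)
  -- pass two: link each kept window to its successor via the valid-start index set
  let d := kept.foldl
    (fun (d : PySem.Dict String (PySem.Set String)) p =>
      if p.1 < n - k ∧ PySem.Set.contains validStarts (p.1 + 1) = true then
        let key := String.ofList p.2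
        let d1 := d.setdefault key PySem.Set.empty
        d1.insert key (PySem.Set.add (d1.getD key PySem.Set.empty)
          (String.ofList (PySem.List.slice cs (some (p.1 + 1)) (some (p.1 + k + 1)))))
      else d)
    PySem.Dict.empty
  (allSubstrings, d.items)

-- ===== PRECONDITION & SPEC =====
-- Pre_ excludes negative k, for which no substring of length k exists: there A's adaptive skip,
-- via Python's negative slice stop, accidentally drops some of the meaningless empty-string
-- windows while B yields one per start index — a corner where both outputs are equally
-- indefensible and no caller could rely on either.
def Pre_find_substrings (sequence : String) (k : Int) : Prop := 0 ≤ k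
instance (sequence : String) (k : Int) : Decidable (Pre_find_substrings sequence k) := by
  unfold Pre_find_substrings; infer_instance

def pvWitness_find_substrings : String × Int := ("ACxGT", 2)

def Spec_find_substrings (sequence : String) (k : Int) (out : List String × (List (String × List String))) : Prop := out = find_substrings_alt sequence k
instance (sequence : String) (k : Int) (out : List String × (List (String × List String))) : Decidable (Spec_find_substrings sequence k out) := by unfold Spec_find_substrings; infer_instance

-- ===== CLAIM (what is proved, stated in full; the proofs are below) =====
def Claim_equal_find_substrings : Prop := ∀ (sequence : String) (k : Int), Dom_find_substrings sequence k → Pre_find_substrings sequence k → Spec_find_substrings sequence k (find_substrings sequence k)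

-- ===== LEMMAS AND PROOFS =====

-- the window sequence[i:i+k] and its validity test, shared vocabulary of the proofs
def pvWin (cs : List Char) (k i : Int) : List Char :=
  PySem.List.slice cs (some i) (some (i + k))
def pvOk (cs : List Char) (k i : Int) : Bool :=
  PySem.Set.issubset (PySem.Set.ofList (pvWin cs k i)) pvValidChars
def pvStepL (cs : List Char) (k : Int) (acc : List String) (i : Int) : List String :=
  if pvOk cs k i then acc ++ [String.ofList (pvWin cs k i)] else acc
def pvNext (cs : List Char) (k i : Int) : List Char :=
  PySem.List.slice cs (some (i + 1)) (some (i + k + 1))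
def pvUpd (cs : List Char) (k i : Int) (d : PySem.Dict String (PySem.Set String)) :
    PySem.Dict String (PySem.Set String) :=
  let key := String.ofList (pvWin cs k i)
  let d1 := if d.contains key then d else d.insert key PySem.Set.empty
  d1.insert key (PySem.Set.add (d1.getD key PySem.Set.empty) (String.ofList (pvNext cs k i)))
def pvStepD (cs : List Char) (k : Int) (d : PySem.Dict String (PySem.Set String)) (i : Int) :
    PySem.Dict String (PySem.Set String) :=
  if pvOk cs k i then
    (if i < (cs.length : Int) - k then
      (if PySem.Set.issubset (PySem.Set.ofList (pvNext cs k i)) pvValidChars then pvUpd cs k i d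
       else d)
     else d)
  else d
-- the index set collected by B's first pass / the valid start indices
def pvF (cs : List Char) (k : Int) : List Int :=
  (PySem.List.pyRange 0 ((cs.length : Int) - k + 1) 1).filter (fun i => pvOk cs k i)

theorem pvNext_eq (cs : List Char) (k i : Int) : pvNext cs k i = pvWin cs k (i + 1) := by
  unfold pvNext pvWin; congr 2; omega

theorem pvWin_eq (cs : List Char) (k : Int) (i : Nat) :
    pvWin cs k i = (cs.drop (min i cs.length)).take
      (PySem.List.clampIdx cs.length ((i : Int) + k) - min i cs.length) := by
  unfold pvWin
  rw [show PySem.List.slice cs (some (i : Int)) (some ((i : Int) + k))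
      = (cs.drop (PySem.List.clampIdx cs.length (i : Int))).take
          (PySem.List.clampIdx cs.length ((i : Int) + k) - PySem.List.clampIdx cs.length (i : Int))
    from rfl]
  rw [PySem.List.clampIdx_natCast]

theorem pvOk_nil (cs : List Char) (k i : Int) (h : pvWin cs k i = []) : pvOk cs k i = true := by
  unfold pvOk; rw [h, PySem.Set.issubset_iff]; intro x hx; simp [PySem.Set.ofList] at hx

theorem pvSkip_ge (cs : List Char) : ∀ (gas i : Nat), i ≤ pvSkip cs gas i := by
  intro gas
  induction gas with
  | zero => intro i; simp [pvSkip]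
  | succ g ih =>
    intro i
    unfold pvSkip
    split
    · split
      · exact le_refl i
      · exact le_trans (Nat.le_succ i) (ih (i+1))
    · exact le_refl i

theorem pvSkip_mem (cs : List Char) : ∀ (gas i t : Nat), i ≤ t → t < pvSkip cs gas i →
    t < cs.length ∧ PySem.Set.contains pvValidChars (cs.getD t 'A') = false := by
  intro gas
  induction gas with
  | zero => intro i t hit hlt; simp [pvSkip] at hlt; omega
  | succ g ih =>
    intro i t hit hlt
    unfold pvSkip at hlt
    by_cases h : i < cs.length
    · simp only [h, dif_pos] at hlt
      by_cases hc : PySem.Set.contains pvValidChars cs[i] = true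
      · simp only [hc, if_pos] at hlt; omega
      · simp only [hc, if_neg, Bool.not_eq_true] at hlt
        rcases Nat.eq_or_lt_of_le hit with heq | hgt
        · subst heq
          refine ⟨h, ?_⟩
          rw [List.getD_eq_getElem?_getD, List.getElem?_eq_getElem h]
          simpa using hc
        · exact ih (i+1) t hgt hlt
    · simp only [h, dif_neg, not_false_iff] at hlt; omega

theorem pvClamp_pos (cs : List Char) (k : Int) (t : Nat) (hk : 1 ≤ k) (ht : t < cs.length) :
    t + 1 ≤ PySem.List.clampIdx cs.length ((t : Int) + k) := by
  have h : ((t : Int) + k) = ((t + k.toNat : Nat) : Int) := by omega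
  rw [h, PySem.List.clampIdx_natCast]; omega

theorem mem_pvWin_self (cs : List Char) (k : Int) (i : Nat) (hi : i < cs.length)
    (hpos : i + 1 ≤ PySem.List.clampIdx cs.length ((i : Int) + k)) :
    cs.getD i 'A' ∈ pvWin cs k i := by
  rw [pvWin_eq, show min i cs.length = i by omega]
  have hs : PySem.List.clampIdx cs.length ((i : Int) + k) - i
      = (PySem.List.clampIdx cs.length ((i : Int) + k) - i - 1) + 1 := by omega
  rw [List.getD_eq_getElem?_getD, List.getElem?_eq_getElem hi, Option.getD_some,
      hs, List.drop_eq_getElem_cons hi, List.take_succ_cons]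
  exact List.mem_cons_self

theorem pvOk_false_of_invalid (cs : List Char) (k : Int) (t : Nat) (ht : t < cs.length)
    (hc : PySem.Set.contains pvValidChars (cs.getD t 'A') = false)
    (hpos : t + 1 ≤ PySem.List.clampIdx cs.length ((t : Int) + k)) : pvOk cs k t = false := by
  by_contra hok
  rw [Bool.not_eq_false] at hok
  unfold pvOk at hok
  rw [PySem.Set.issubset_iff] at hok
  have hmem := hok _ ((PySem.Set.mem_ofList _ _).mpr (mem_pvWin_self cs k t ht hpos))
  rw [← PySem.Set.contains_iff] at hmem
  rw [hc] at hmem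
  cases hmem

theorem pvOk_false_elim (cs : List Char) (k : Int) (hk : 0 ≤ k) (i : Nat)
    (hf : pvOk cs k (i : Int) = false) : i < cs.length ∧ 1 ≤ k := by
  have hne : pvWin cs k (i : Int) ≠ [] := by
    intro h; rw [pvOk_nil cs k _ h] at hf; cases hf
  rw [pvWin_eq] at hne
  by_cases hi : i < cs.length
  swap
  · exfalso; apply hne; rw [show min i cs.length = cs.length by omega]; simp
  refine ⟨hi, ?_⟩
  rw [show min i cs.length = i by omega] at hne
  have hpos : i + 1 ≤ PySem.List.clampIdx cs.length ((i : Int) + k) := by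
    by_contra hle
    apply hne
    rw [show PySem.List.clampIdx cs.length ((i : Int) + k) - i = 0 by omega]
    simp
  rcases eq_or_lt_of_le hk with hk0 | hk1
  · exfalso
    rw [← hk0, show ((i : Int) + 0) = ((i : Nat) : Int) by omega,
        PySem.List.clampIdx_natCast] at hpos
    omega
  · omega

-- every index the skip loop jumps over has an invalid window (for 0 ≤ k)
theorem pv_skip_range_false (cs : List Char) (k : Int) (hk : 0 ≤ k) (i : Nat)
    (hiw : pvOk cs k (i : Int) = false) (t : Nat) (hit : i + 1 ≤ t)
    (hlt : t < pvSkip cs cs.length (i + 1)) : pvOk cs k (t : Int) = false := by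
  obtain ⟨htlen, htc⟩ := pvSkip_mem cs cs.length (i + 1) t hit hlt
  obtain ⟨hilen, hk1⟩ := pvOk_false_elim cs k hk i hiw
  exact pvOk_false_of_invalid cs k t htlen htc (pvClamp_pos cs k t hk1 htlen)

theorem pv_foldl_stepL_id (cs : List Char) (k : Int) (l : List Int) (acc : List String)
    (h : ∀ x ∈ l, pvOk cs k x = false) : l.foldl (pvStepL cs k) acc = acc := by
  rw [PySem.List.foldl_congr_mem l (pvStepL cs k) (fun acc _ => acc) acc
    (by intro a x hx; simp [pvStepL, h x hx]), PySem.List.foldl_ignore]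

theorem pv_foldl_stepD_id (cs : List Char) (k : Int) (l : List Int)
    (d : PySem.Dict String (PySem.Set String))
    (h : ∀ x ∈ l, pvOk cs k x = false) : l.foldl (pvStepD cs k) d = d := by
  rw [PySem.List.foldl_congr_mem l (pvStepD cs k) (fun acc _ => acc) d
    (by intro a x hx; simp [pvStepD, h x hx]), PySem.List.foldl_ignore]

theorem pvLoopA_succ (cs : List Char) (k : Int) (g i : Nat) (acc : List String)
    (d : PySem.Dict String (PySem.Set String)) :
    pvLoopA cs k (g+1) i acc d =
      if (i : Int) ≤ (cs.length : Int) - k then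
        (if pvOk cs k (i : Int) then
           pvLoopA cs k g (i+1) (acc ++ [String.ofList (pvWin cs k (i : Int))])
             (if (i : Int) < (cs.length : Int) - k then
                (if PySem.Set.issubset (PySem.Set.ofList (pvNext cs k (i : Int))) pvValidChars then
                   pvUpd cs k (i : Int) d
                 else d)
              else d)
         else pvLoopA cs k g (pvSkip cs cs.length (i+1)) acc d)
      else (acc, d.items) := rfl

theorem pvLoopA_spec (cs : List Char) (k : Int) (hk : 0 ≤ k) :
    ∀ (gas i : Nat) (acc : List String) (d : PySem.Dict String (PySem.Set String)),
      ((cs.length : Int) - k + 1 - i).toNat < gas →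
      pvLoopA cs k gas i acc d =
        ((PySem.List.pyRange (i : Int) ((cs.length : Int) - k + 1) 1).foldl (pvStepL cs k) acc,
         ((PySem.List.pyRange (i : Int) ((cs.length : Int) - k + 1) 1).foldl (pvStepD cs k) d).items) := by
  intro gas
  induction gas with
  | zero => intro i acc d h; exact absurd h (Nat.not_lt_zero _)
  | succ g ih =>
    intro i acc d h
    by_cases hc : (i : Int) ≤ (cs.length : Int) - k
    case neg =>
      rw [pvLoopA_succ, if_neg hc, PySem.List.pyRange_one_eq_nil (by omega)]
      simp
    case pos =>
      rw [pvLoopA_succ, if_pos hc]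
      by_cases hv : pvOk cs k (i : Int) = true
      · rw [if_pos hv]
        rw [PySem.List.pyRange_one_cons (show (i : Int) < (cs.length : Int) - k + 1 by omega)]
        simp only [List.foldl_cons]
        have hcast : ((i + 1 : Nat) : Int) = (i : Int) + 1 := by push_cast; ring
        rw [ih (i+1) _ _ (by omega), hcast]
        congr 2
        · unfold pvStepL; rw [if_pos hv]
        · unfold pvStepD; rw [if_pos hv]
      · rw [if_neg hv]
        have hoki : pvOk cs k (i : Int) = false := Bool.eq_false_iff.mpr hv
        have hij : i + 1 ≤ pvSkip cs cs.length (i + 1) := pvSkip_ge cs cs.length (i+1)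
        by_cases hjle : ((pvSkip cs cs.length (i + 1) : Nat) : Int) ≤ (cs.length : Int) - k + 1
        · rw [PySem.List.pyRange_one_append (i : Int) ((pvSkip cs cs.length (i + 1) : Nat) : Int)
              ((cs.length : Int) - k + 1) (by omega) hjle]
          rw [List.foldl_append, List.foldl_append]
          have hid : ∀ x ∈ PySem.List.pyRange (i : Int) ((pvSkip cs cs.length (i + 1) : Nat) : Int) 1,
              pvOk cs k x = false := by
            intro x hx
            rw [PySem.List.mem_pyRange_one] at hx
            rcases eq_or_lt_of_le hx.1 with heq | hgt
            · rw [← heq]; exact hoki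
            · rw [show x = ((x.toNat : Nat) : Int) by omega]
              exact pv_skip_range_false cs k hk i hoki x.toNat (by omega) (by omega)
          rw [pv_foldl_stepL_id _ _ _ _ hid, pv_foldl_stepD_id _ _ _ _ hid]
          exact ih (pvSkip cs cs.length (i + 1)) acc d (by omega)
        · have hid : ∀ x ∈ PySem.List.pyRange (i : Int) ((cs.length : Int) - k + 1) 1,
              pvOk cs k x = false := by
            intro x hx
            rw [PySem.List.mem_pyRange_one] at hx
            rcases eq_or_lt_of_le hx.1 with heq | hgt
            · rw [← heq]; exact hoki
            · rw [show x = ((x.toNat : Nat) : Int) by omega]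
              exact pv_skip_range_false cs k hk i hoki x.toNat (by omega) (by omega)
          rw [pv_foldl_stepL_id _ _ _ _ hid, pv_foldl_stepD_id _ _ _ _ hid]
          rw [ih (pvSkip cs cs.length (i + 1)) acc d (by omega)]
          rw [PySem.List.pyRange_one_eq_nil (by omega)]
          simp

theorem pvWin_def (cs : List Char) (k i : Int) :
    PySem.List.slice cs (some i) (some (i + k)) = pvWin cs k i := rfl

theorem pvOk_def' (cs : List Char) (k i : Int) :
    (PySem.Set.issubset (PySem.Set.ofList (pvWin cs k i)) pvValidChars) = pvOk cs k i := rfl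

theorem pv_alt_fold_pair (cs : List Char) (k : Int) :
    (PySem.List.pyRange 0 ((cs.length : Int) - k + 1) 1).foldl
      (fun (st : List (Int × List Char) × PySem.Set Int) i =>
        if PySem.Set.issubset (PySem.Set.ofList (PySem.List.slice cs (some i) (some (i + k)))) pvValidChars = true then
          (st.1 ++ [(i, PySem.List.slice cs (some i) (some (i + k)))], PySem.Set.add st.2 i)
        else st)
      ([], PySem.Set.empty)
    = ((pvF cs k).map (fun i => (i, pvWin cs k i)), PySem.Set.ofList (pvF cs k)) := by
  rw [PySem.List.foldl_congr_mem _ _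
      (fun (st : List (Int × List Char) × PySem.Set Int) i =>
        ((fun (l : List (Int × List Char)) i => if pvOk cs k i = true then l ++ [(i, pvWin cs k i)] else l) st.1 i,
         (fun (s : PySem.Set Int) i => if pvOk cs k i = true then PySem.Set.add s i else s) st.2 i)) _
      (by
        intro acc x _
        simp only [pvWin_def, pvOk_def']
        by_cases hp : pvOk cs k x = true
        · simp [hp]
        · simp [hp])]
  rw [PySem.List.foldl_prod_mk
        (f := fun (l : List (Int × List Char)) i =>
          if pvOk cs k i = true then l ++ [(i, pvWin cs k i)] else l)
        (g := fun (s : PySem.Set Int) i => if pvOk cs k i = true then PySem.Set.add s i else s),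
      PySem.List.foldl_append_if, PySem.List.foldl_if_eq_foldl_filter]
  simp [pvF, PySem.Set.ofList_eq_foldl, PySem.Set.empty]

theorem pv_alt_dict (cs : List Char) (k : Int) :
    ((pvF cs k).map (fun i => (i, pvWin cs k i))).foldl
      (fun (d : PySem.Dict String (PySem.Set String)) p =>
        if p.1 < (cs.length : Int) - k ∧ PySem.Set.contains (PySem.Set.ofList (pvF cs k)) (p.1 + 1) = true then
          (d.setdefault (String.ofList p.2) PySem.Set.empty).insert (String.ofList p.2)
            (PySem.Set.add
              ((d.setdefault (String.ofList p.2) PySem.Set.empty).getD (String.ofList p.2) PySem.Set.empty)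
              (String.ofList (PySem.List.slice cs (some (p.1 + 1)) (some (p.1 + k + 1)))))
        else d)
      PySem.Dict.empty
    = (PySem.List.pyRange 0 ((cs.length : Int) - k + 1) 1).foldl (pvStepD cs k) PySem.Dict.empty := by
  rw [PySem.List.foldl_congr_mem _ (pvStepD cs k)
      (fun (d : PySem.Dict String (PySem.Set String)) i =>
        if pvOk cs k i = true then
          (if i < (cs.length : Int) - k then
            (if PySem.Set.issubset (PySem.Set.ofList (pvNext cs k i)) pvValidChars = true then
               pvUpd cs k i d
             else d)
           else d)
        else d) _ (by intro acc x _; rfl)]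
  rw [PySem.List.foldl_if_eq_foldl_filter (fun i => pvOk cs k i)]
  rw [List.foldl_map]
  rw [show (PySem.List.pyRange 0 ((cs.length : Int) - k + 1) 1).filter (fun i => pvOk cs k i) = pvF cs k from rfl]
  apply PySem.List.foldl_congr_mem
  intro d x hx
  have hxm := hx
  unfold pvF at hxm
  rw [List.mem_filter, PySem.List.mem_pyRange_one] at hxm
  obtain ⟨⟨hx0, hxlt⟩, hxok⟩ := hxm
  dsimp only
  by_cases h1 : x < (cs.length : Int) - k
  · have hconn : (PySem.Set.contains (PySem.Set.ofList (pvF cs k)) (x + 1) = true)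
        ↔ (pvOk cs k (x + 1) = true) := by
      rw [PySem.Set.contains_iff, PySem.Set.mem_ofList _ _]
      unfold pvF
      rw [List.mem_filter, PySem.List.mem_pyRange_one]
      constructor
      · rintro ⟨_, hh⟩; exact hh
      · intro hh; exact ⟨⟨by omega, by omega⟩, hh⟩
    by_cases h2 : pvOk cs k (x + 1) = true
    · have h2' : PySem.Set.issubset (PySem.Set.ofList (pvNext cs k x)) pvValidChars = true := by
        rw [pvNext_eq]; exact h2
      rw [if_pos ⟨h1, hconn.mpr h2⟩, if_pos h1, if_pos h2']
      unfold pvUpd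
      dsimp only
      by_cases hcont : d.contains (String.ofList (pvWin cs k x)) = true
      · rw [PySem.Dict.setdefault_of_contains _ _ hcont, if_pos hcont]; rfl
      · rw [PySem.Dict.setdefault_of_not_contains _ _ (Bool.eq_false_iff.mpr hcont), if_neg hcont]; rfl
    · rw [if_neg (fun hcd => h2 (hconn.mp hcd.2)), if_pos h1,
          if_neg (fun hss => h2 (by rw [pvNext_eq] at hss; exact hss))]
  · rw [if_neg (fun hcd => h1 hcd.1), if_neg h1]

theorem pv_alt_eq (sequence : String) (k : Int) :
    find_substrings_alt sequence k =
      ((PySem.List.pyRange 0 ((sequence.toList.length : Int) - k + 1) 1).foldl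
          (pvStepL sequence.toList k) [],
       ((PySem.List.pyRange 0 ((sequence.toList.length : Int) - k + 1) 1).foldl
          (pvStepD sequence.toList k) PySem.Dict.empty).items) := by
  simp only [find_substrings_alt]
  rw [pv_alt_fold_pair]
  dsimp only
  rw [List.map_map, pv_alt_dict]
  congr 1
  rw [PySem.List.foldl_congr_mem _ (pvStepL sequence.toList k)
      (fun (acc : List String) i =>
        if pvOk sequence.toList k i = true then
          acc ++ [String.ofList (pvWin sequence.toList k i)]
        else acc) _ (by intro acc x _; rfl)]
  rw [PySem.List.foldl_append_if]
  simp [pvF]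

-- ===== VERDICT (by name: the statement is the Claim_ definition above) =====
theorem find_substrings_spec : Claim_equal_find_substrings := by
  intro sequence k hDom hPre
  unfold Spec_find_substrings
  simp only [find_substrings]
  rw [pvLoopA_spec sequence.toList k hPre _ 0 [] PySem.Dict.empty (by omega)]
  rw [pv_alt_eq]
  norm_num
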